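-- pv_equiv track=rewrite | github.com/drewcmaier/advent-of-code-2024 | day4/day4.py | find_patterns_in_word_search
-- ===== SOURCE A (Python) =====
-- def find_patterns_in_word_search(board, patterns):
--     rows, cols = len(board), len(board[0])
--
--     def matches_pattern(r, c, pattern):
--         pattern_rows, pattern_cols = len(pattern), len(pattern[0])
--
--         for r_pattern in range(0, pattern_rows):
--             for c_pattern in range(0, pattern_cols):
--                 board_r, board_c = r+r_pattern, c+c_pattern
--                 if board_r >= rows or board_c >= cols:
--                     return False
--
--                 # No match if pattern is filled in and different than board
--                 if pattern[r_pattern][c_pattern] != '.' and pattern[r_pattern][c_pattern] != board[board_r][board_c]: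
--                     return False
--
--         return True
--
--
--     count = 0
--     for r in range(rows):
--         for c in range(cols):
--             for pattern in patterns:
--                 if matches_pattern(r, c, pattern):
--                     count += 1
--
--     return count
-- ===== SOURCE B (Python) =====
-- def find_patterns_in_word_search(board, patterns):
--     rows, cols = len(board), len(board[0])
--     if cols == 0:
--         return 0  # no anchor columns: nothing can match
--     # index: char -> row-major list of (r, c) positions on the board
--     index = {}
--     for r, row in enumerate(board):
--         for c, ch in enumerate(row):
--             index.setdefault(ch, []).append((r, c))
--     total = 0
--     for pattern in patterns:
--         pr, pc = len(pattern), len(pattern[0])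
--         cells = [(dr, dc, ch)
--                  for dr, prow in enumerate(pattern)
--                  for dc, ch in enumerate(prow)
--                  if ch != '.']
--         if not cells:
--             # all-wildcard pattern: every anchor where it fits in bounds matches
--             total += max(0, rows - pr + 1) * max(0, cols - pc + 1)
--             continue
--         dr0, dc0, ch0 = cells[0]
--         for (r, c) in index.get(ch0, []):
--             r0, c0 = r - dr0, c - dc0
--             if r0 < 0 or c0 < 0 or r0 + pr > rows or c0 + pc > cols:
--                 continue
--             if all(board[r0 + dr][c0 + dc] == ch for dr, dc, ch in cells[1:]):
--                 total += 1
--     return total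
-- ===== Notes on version B (the rewrite author's own statement) =====
-- stated objective: alternative
-- what changed: B builds a per-character position index of the board once and, per pattern, probes only anchors whose first non-wildcard cell lies on a matching board character (all-wildcard patterns counted in closed form), instead of A's scan of every anchor against every pattern cell.
-- outside the precondition, e.g. on find_patterns_in_word_search(['ab', 'aa'], [['a', 'ab']]): A returns 1, B returns 0; on find_patterns_in_word_search(['a'], [['', '']]): A returns 1, B returns 0; on find_patterns_in_word_search(['ab', 'a'], [['..']]): A returns 2, B returns 2
import Mathlib
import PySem

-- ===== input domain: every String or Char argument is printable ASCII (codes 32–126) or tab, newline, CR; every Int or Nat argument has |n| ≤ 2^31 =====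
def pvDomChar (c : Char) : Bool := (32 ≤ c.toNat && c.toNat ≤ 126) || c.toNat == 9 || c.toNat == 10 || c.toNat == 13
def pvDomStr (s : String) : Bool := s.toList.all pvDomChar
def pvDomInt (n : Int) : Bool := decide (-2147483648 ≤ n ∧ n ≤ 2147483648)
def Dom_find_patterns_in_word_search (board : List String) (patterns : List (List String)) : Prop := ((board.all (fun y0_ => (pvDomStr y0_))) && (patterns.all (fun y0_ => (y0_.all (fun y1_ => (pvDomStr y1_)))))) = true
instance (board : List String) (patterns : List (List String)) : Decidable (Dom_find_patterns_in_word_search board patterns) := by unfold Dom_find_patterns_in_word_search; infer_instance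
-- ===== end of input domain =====

-- B replaces A's scan of every anchor × every pattern cell by a per-character position index:
-- each pattern is probed only at anchors whose first concrete cell sits on a matching board character
-- (all-wildcard patterns are counted in closed form). Objective: alternative algorithm.

-- board[r][c] / pattern[r][c] — both Pythons use this exact double index (defaults never reached under Pre_)
def pvCell (g : List String) (r c : Int) : Char :=
  (PySem.Str.pyGet? ((PySem.List.pyGet? g r).getD "") c).getD ' '

-- ===== PORT A =====
-- matches_pattern(r, c, pattern): early 'return False' inside the pure double loop = List.all
def pvMatches (board : List String) (rows cols : Int) (r c : Int) (pattern : List String) : Bool :=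
  let prows : Int := pattern.length
  let pcols : Int := PySem.Str.len ((PySem.List.pyGet? pattern 0).getD "")
  (PySem.List.pyRange 0 prows 1).all (fun rp =>
    (PySem.List.pyRange 0 pcols 1).all (fun cp =>
      let br := r + rp
      let bc := c + cp
      if rows ≤ br ∨ cols ≤ bc then false
      else
        let pch := pvCell pattern rp cp
        if pch ≠ '.' ∧ pch ≠ pvCell board br bc then false else true))

def find_patterns_in_word_search (board : List String) (patterns : List (List String)) : Int :=
  let rows : Int := board.length
  let cols : Int := PySem.Str.len ((PySem.List.pyGet? board 0).getD "")
  (PySem.List.pyRange 0 rows 1).foldl (fun count r =>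
    (PySem.List.pyRange 0 cols 1).foldl (fun count c =>
      patterns.foldl (fun count pattern =>
        if pvMatches board rows cols r c pattern then count + 1 else count) count) count) 0

-- ===== PORT B =====
-- index.setdefault(ch, []).append((r, c)) over the two enumerate loops
def pvIndex (board : List String) : PySem.Dict Char (List (Int × Int)) :=
  (PySem.List.enumerate board).foldl (fun d rp =>
    (PySem.List.enumerate rp.2.toList).foldl (fun d cp =>
      d.modify cp.2 [] (fun l => l ++ [(rp.1, cp.1)])) d) PySem.Dict.empty

-- [(dr, dc, ch) for dr, prow in enumerate(pattern) for dc, ch in enumerate(prow) if ch != '.']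
def pvCells (pattern : List String) : List (Int × Int × Char) :=
  (PySem.List.enumerate pattern).flatMap (fun rp =>
    ((PySem.List.enumerate rp.2.toList).filter (fun cp => cp.2 ≠ '.')).map
      (fun cp => (rp.1, cp.1, cp.2)))

def find_patterns_in_word_search_alt (board : List String) (patterns : List (List String)) : Int :=
  let rows : Int := board.length
  let cols : Int := PySem.Str.len ((PySem.List.pyGet? board 0).getD "")
  if cols = 0 then 0 else  -- no anchor columns: nothing can match
  let index := pvIndex board
  patterns.foldl (fun total pattern =>
    let pr : Int := pattern.length
    let pc : Int := PySem.Str.len ((PySem.List.pyGet? pattern 0).getD "")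
    match pvCells pattern with
    | [] => total + max 0 (rows - pr + 1) * max 0 (cols - pc + 1)
    | (dr0, dc0, ch0) :: rest =>
      (index.getD ch0 []).foldl (fun total p =>
        let r0 := p.1 - dr0
        let c0 := p.2 - dc0
        if r0 < 0 ∨ c0 < 0 ∨ rows < r0 + pr ∨ cols < c0 + pc then total
        else if rest.all (fun q => pvCell board (r0 + q.1) (c0 + q.2.1) == q.2.2) then total + 1
        else total) total) 0

-- ===== PRECONDITION & SPEC =====
-- Pre_ is the word search's natural domain: a non-empty board, and — except in the trivial cases of
-- no patterns or a zero-width board, where A scans nothing — rows at least as long as row 0 and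
-- exactly rectangular non-empty patterns of positive width. Outside it A raises IndexError on almost
-- all inputs (indexing a too-short board or pattern row); on the inputs there where A does return
-- (ragged or zero-width patterns whose out-of-shape cells A silently never reads) its value is an
-- artefact of A's interleaved bound checks.
def Pre_find_patterns_in_word_search (board : List String) (patterns : List (List String)) : Prop :=
  board ≠ [] ∧
  (patterns = [] ∨ PySem.Str.len (board.headD "") = 0 ∨
    ((∀ row ∈ board, PySem.Str.len (board.headD "") ≤ PySem.Str.len row) ∧
     ∀ p ∈ patterns, p ≠ [] ∧ 1 ≤ PySem.Str.len (p.headD "") ∧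
       ∀ prow ∈ p, PySem.Str.len prow = PySem.Str.len (p.headD "")))
instance (board : List String) (patterns : List (List String)) : Decidable (Pre_find_patterns_in_word_search board patterns) := by
  unfold Pre_find_patterns_in_word_search; infer_instance

def pvWitness_find_patterns_in_word_search : List String × List (List String) :=
  (["ab", "ba"], [["a"], ["..", "b."]])

def Spec_find_patterns_in_word_search (board : List String) (patterns : List (List String)) (out : Int) : Prop := out = find_patterns_in_word_search_alt board patterns
instance (board : List String) (patterns : List (List String)) (out : Int) : Decidable (Spec_find_patterns_in_word_search board patterns out) := by unfold Spec_find_patterns_in_word_search; infer_instance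

-- ===== CLAIM (what is proved, stated in full; the proofs are below) =====
def Claim_equal_find_patterns_in_word_search : Prop := ∀ (board : List String) (patterns : List (List String)), Dom_find_patterns_in_word_search board patterns → Pre_find_patterns_in_word_search board patterns → Spec_find_patterns_in_word_search board patterns (find_patterns_in_word_search board patterns)

-- ===== LEMMAS AND PROOFS =====

-- the canonical match predicate both counts are reduced to
def pvM (board : List String) (rows cols : Int) (pattern : List String) (r c : Int) : Bool :=
  decide (0 ≤ r ∧ 0 ≤ c ∧ r + pattern.length ≤ rows ∧
          c + PySem.Str.len ((PySem.List.pyGet? pattern 0).getD "") ≤ cols) &&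
  (pvCells pattern).all (fun q => pvCell board (r + q.1) (c + q.2.1) == q.2.2)

lemma pv_sum_pyRange (f : ℤ → ℤ) (a b : ℤ) :
    ((PySem.List.pyRange a b).map f).sum = ∑ x ∈ Finset.Ico a b, f x := by
  by_cases h : b ≤ a
  · rw [PySem.List.pyRange_one_eq_nil h, Finset.Ico_eq_empty (by omega)]; simp
  · have h : a < b := by omega
    have hlt : (b - (a+1)).toNat < (b - a).toNat := by omega
    rw [PySem.List.pyRange_one_cons h, List.map_cons, List.sum_cons,
        pv_sum_pyRange f (a+1) b, ← Finset.insert_Ico_add_one_left_eq_Ico h,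
        Finset.sum_insert (by simp)]
termination_by (b - a).toNat

lemma pv_countP_pyRange (p : ℤ → Bool) (a b : ℤ) :
    ((PySem.List.pyRange a b).countP p : ℤ) = ∑ x ∈ Finset.Ico a b, (if p x then (1:ℤ) else 0) := by
  rw [← pv_sum_pyRange, ← PySem.List.sum_map_ite_one_zero]

lemma pv_shift1 (g : ℤ → ℤ) (n d e : ℤ) (hd : 0 ≤ d) (hde : d < e)
    (hsupp : ∀ x, g x ≠ 0 → 0 ≤ x ∧ x + e ≤ n) :
    ∑ x ∈ Finset.Ico (0:ℤ) n, g (x - d) = ∑ x ∈ Finset.Ico (0:ℤ) n, g x := by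
  have h1 : ∑ x ∈ Finset.Ico (0:ℤ) n, g (x - d)
      = ∑ y ∈ Finset.Ico (-d) (n - d), g y := by
    have hm : Finset.Ico (0:ℤ) n = Finset.map (addRightEmbedding d) (Finset.Ico (-d) (n - d)) := by
      rw [Finset.map_add_right_Ico]; congr 1 <;> ring
    rw [hm, Finset.sum_map]
    refine Finset.sum_congr rfl (fun y _ => ?_)
    simp [addRightEmbedding]
  rw [h1]
  have hsub : Finset.Ico (0:ℤ) (n - e + 1) ⊆ Finset.Ico (-d) (n - d) := by
    intro x hx; simp [Finset.mem_Ico] at *; omega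
  have hsub2 : Finset.Ico (0:ℤ) (n - e + 1) ⊆ Finset.Ico (0:ℤ) n := by
    intro x hx; simp [Finset.mem_Ico] at *; omega
  rw [← Finset.sum_subset hsub, ← Finset.sum_subset hsub2]
  · intro x hx hnx
    by_contra hne
    have := hsupp x hne
    simp [Finset.mem_Ico] at hx hnx
    omega
  · intro x hx hnx
    by_contra hne
    have := hsupp x hne
    simp [Finset.mem_Ico] at hx hnx
    omega

lemma pv_pyGetD_cons_pos {α : Type} (x : α) (t : List α) (i : ℤ) (d : α) (h : 1 ≤ i) :
    PySem.List.pyGetD (x :: t) i d = PySem.List.pyGetD t (i - 1) d := by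
  rw [PySem.List.pyGetD_of_nonneg _ _ (by omega), PySem.List.pyGetD_of_nonneg _ _ (by omega)]
  have : i.toNat = (i-1).toNat + 1 := by omega
  rw [this]
  rfl

lemma pv_enumerate_eq {α : Type} (xs : List α) (d : α) (s : ℤ) :
    PySem.List.enumerate xs s
      = (PySem.List.pyRange s (s + xs.length)).map (fun j => (j, PySem.List.pyGetD xs (j - s) d)) := by
  induction xs generalizing s with
  | nil =>
    have : s + (([] : List α).length : ℤ) = s := by simp
    rw [this, PySem.List.pyRange_one_eq_nil le_rfl]
    rfl
  | cons x t ih =>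
    have h1 : s < s + ((x :: t).length : ℤ) := by simp
    rw [PySem.List.pyRange_one_cons h1, List.map_cons]
    show (s, x) :: PySem.List.enumerate t (s+1) = _
    congr 1
    · simp [PySem.List.pyGetD]
    · rw [ih (s+1)]
      have : s + ((x :: t).length : ℤ) = (s+1) + (t.length : ℤ) := by simp; ring
      rw [this]
      refine List.map_congr_left (fun j hj => ?_)
      rw [PySem.List.mem_pyRange_one] at hj
      rw [pv_pyGetD_cons_pos _ _ _ _ (by omega)]
      congr 2
      ring

lemma pv_foldl_flatMap {α β : Type} (l : List α) (g : α → List β) (f : γ → β → γ) (init : γ) :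
    (l.flatMap g).foldl f init = l.foldl (fun a x => (g x).foldl f a) init := by
  induction l generalizing init with
  | nil => rfl
  | cons x t ih => simp [List.flatMap_cons, List.foldl_append, ih]

lemma pv_countP_flatMap {α β : Type} (l : List α) (g : α → List β) (p : β → Bool) :
    (l.flatMap g).countP p = (l.map (fun x => (g x).countP p)).sum := by
  induction l with
  | nil => rfl
  | cons x t ih => simp [List.flatMap_cons, List.countP_append, ih]

lemma pv_pvCell_eq (g : List String) (r c : Int) :
    pvCell g r c = PySem.List.pyGetD (PySem.List.pyGetD g r "").toList c ' ' := rfl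

-- rectangular-pattern normal form of pvCells
lemma pv_pvCells_eq (pattern : List String)
    (hrect : ∀ prow ∈ pattern, PySem.Str.len prow = PySem.Str.len ((PySem.List.pyGet? pattern 0).getD "")) :
    pvCells pattern =
      (PySem.List.pyRange 0 (pattern.length : ℤ)).flatMap (fun rp =>
        ((PySem.List.pyRange 0 (PySem.Str.len ((PySem.List.pyGet? pattern 0).getD ""))).filter
            (fun cp => pvCell pattern rp cp ≠ '.')).map
          (fun cp => (rp, cp, pvCell pattern rp cp))) := by
  unfold pvCells
  rw [pv_enumerate_eq pattern "" 0, List.flatMap_map]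
  have hz : ((0:ℤ) + (pattern.length:ℤ)) = (pattern.length:ℤ) := by ring
  rw [hz]
  refine List.flatMap_congr (fun rp hrp => ?_)
  rw [PySem.List.mem_pyRange_one] at hrp
  have hrow : PySem.List.pyGetD pattern (rp - 0) "" = PySem.List.pyGetD pattern rp "" := by
    congr 1; ring
  rw [hrow]
  have hmem : PySem.List.pyGetD pattern rp "" ∈ pattern :=
    PySem.List.pyGetD_mem pattern "" (by constructor <;> omega)
  have hlen : (((PySem.List.pyGetD pattern rp "").toList.length : ℤ))
      = PySem.Str.len ((PySem.List.pyGet? pattern 0).getD "") := by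
    rw [← hrect _ hmem, PySem.Str.len_eq]
  rw [pv_enumerate_eq (PySem.List.pyGetD pattern rp "").toList ' ' 0]
  have hz2 : ((0:ℤ) + ((PySem.List.pyGetD pattern rp "").toList.length:ℤ))
      = PySem.Str.len ((PySem.List.pyGet? pattern 0).getD "") := by rw [← hlen]; ring
  rw [hz2, List.filter_map, List.map_map]
  have hfun : ∀ cp : ℤ, pvCell pattern rp cp = PySem.List.pyGetD (PySem.List.pyGetD pattern rp "").toList cp ' ' :=
    fun cp => pv_pvCell_eq pattern rp cp
  congr 1
  · funext cp
    simp only [Function.comp, sub_zero, hfun cp]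
  · apply List.filter_congr
    intro cp _
    simp only [Function.comp, sub_zero, hfun cp]

-- proof-side view of the board as (char, r, c) triples in row-major order
def pvPairs (board : List String) : List (Char × Int × Int) :=
  (PySem.List.enumerate board).flatMap (fun rp =>
    (PySem.List.enumerate rp.2.toList).map (fun cp => (cp.2, rp.1, cp.1)))

lemma pv_pvPairs_eq (board : List String) :
    pvPairs board =
      (PySem.List.pyRange 0 (board.length : ℤ)).flatMap (fun i =>
        (PySem.List.pyRange 0 ((PySem.List.pyGetD board i "").toList.length : ℤ)).map
          (fun j => (pvCell board i j, i, j))) := by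
  unfold pvPairs
  rw [pv_enumerate_eq board "" 0, List.flatMap_map]
  rw [show ((0:ℤ) + (board.length:ℤ)) = (board.length:ℤ) by ring]
  refine List.flatMap_congr (fun i hi => ?_)
  rw [show i - (0:ℤ) = i by ring]
  rw [pv_enumerate_eq (PySem.List.pyGetD board i "").toList ' ' 0]
  rw [show ((0:ℤ) + ((PySem.List.pyGetD board i "").toList.length:ℤ))
      = ((PySem.List.pyGetD board i "").toList.length:ℤ) by ring]
  rw [List.map_map]
  refine List.map_congr_left (fun j hj => ?_)
  simp only [Function.comp, sub_zero]
  rw [pv_pvCell_eq]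

lemma pv_pvIndex_getD (board : List String) (ch : Char) :
    (pvIndex board).getD ch []
      = ((pvPairs board).filter (fun q => q.1 == ch)).map (fun q => q.2) := by
  unfold pvIndex
  have hstep : ∀ (d : PySem.Dict Char (List (Int × Int))),
      (PySem.List.enumerate board).foldl (fun d rp =>
        (PySem.List.enumerate rp.2.toList).foldl (fun d cp =>
          d.modify cp.2 [] (fun l => l ++ [(rp.1, cp.1)])) d) d
      = (pvPairs board).foldl (fun d p => d.modify p.1 [] (fun l => l ++ [p.2])) d := by
    intro d
    unfold pvPairs
    rw [pv_foldl_flatMap]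
    refine PySem.List.foldl_congr_mem _ _ _ _ (fun d rp _ => ?_)
    rw [List.foldl_map]
  rw [hstep, PySem.Dict.getD_foldl_modify_append]
  simp [PySem.Dict.getD_empty]


lemma pv_pvMatches_eq (board : List String) (rows cols : ℤ) (pattern : List String)
    (hp : pattern ≠ [])
    (hpc : 1 ≤ PySem.Str.len ((PySem.List.pyGet? pattern 0).getD ""))
    (hrect : ∀ prow ∈ pattern, PySem.Str.len prow = PySem.Str.len ((PySem.List.pyGet? pattern 0).getD ""))
    (r c : Int) (hr : 0 ≤ r) (hc : 0 ≤ c) :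
    pvMatches board rows cols r c pattern = pvM board rows cols pattern r c := by
  have hN : 1 ≤ (pattern.length : ℤ) := by
    have := List.length_pos_iff.2 hp; omega
  rw [Bool.eq_iff_iff]
  simp only [pvMatches, pvM, List.all_eq_true, PySem.List.mem_pyRange_one,
    pv_pvCells_eq pattern hrect, List.mem_flatMap, List.mem_map, List.mem_filter,
    PySem.List.mem_pyRange_one, Bool.and_eq_true, decide_eq_true_eq, beq_iff_eq]
  constructor
  · intro h
    refine ⟨⟨hr, hc, ?_, ?_⟩, ?_⟩
    · have := h ((pattern.length : ℤ) - 1) ⟨by omega, by omega⟩ 0 ⟨le_rfl, by omega⟩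
      split_ifs at this with h1 h2
      omega
    · have := h 0 ⟨le_rfl, by omega⟩ ((PySem.Str.len ((PySem.List.pyGet? pattern 0).getD "")) - 1) ⟨by omega, by omega⟩
      split_ifs at this with h1 h2
      omega
    · rintro q ⟨rp, hrp, hq⟩
      rcases hq with ⟨cp, ⟨⟨hcp1, hcp2⟩, hdot⟩, rfl⟩
      have := h rp hrp cp ⟨hcp1, hcp2⟩
      split_ifs at this with h1 h2
      push Not at h2
      by_cases hw : pvCell pattern rp cp = '.'
      · exact absurd hw hdot
      · exact (h2 hw).symm
  · rintro ⟨⟨-, -, hbr, hbc⟩, hcells⟩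
    intro rp hrp cp hcp
    have hb1 : ¬ (rows ≤ r + rp ∨ cols ≤ c + cp) := by omega
    rw [if_neg hb1]
    by_cases hw : pvCell pattern rp cp = '.'
    · rw [if_neg (by simp [hw])]
    · have hmem : pvCell board (r + rp) (c + cp) = pvCell pattern rp cp :=
        hcells (rp, cp, pvCell pattern rp cp) ⟨rp, hrp, cp, ⟨⟨hcp.1, hcp.2⟩, hw⟩, rfl⟩
      have : ¬ (pvCell pattern rp cp ≠ '.' ∧ pvCell pattern rp cp ≠ pvCell board (r + rp) (c + cp)) := by
        rw [hmem]; simp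
      rw [if_neg this]


lemma pv_count_interval (n k K : ℤ) (hk : 1 ≤ k) :
    ∑ x ∈ Finset.Ico (0:ℤ) n, (if x + k ≤ n then K else 0) = max 0 (n - k + 1) * K := by
  have h1 : ∑ x ∈ Finset.Ico (0:ℤ) n, (if x + k ≤ n then K else 0)
      = ∑ x ∈ Finset.Ico (0:ℤ) n, (if x ∈ Finset.Ico (0:ℤ) (n - k + 1) then K else 0) := by
    refine Finset.sum_congr rfl (fun x hx => ?_)
    rw [Finset.mem_Ico] at hx
    by_cases h : x + k ≤ n
    · rw [if_pos h, if_pos (by rw [Finset.mem_Ico]; omega)]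
    · rw [if_neg h, if_neg (by rw [Finset.mem_Ico]; omega)]
  rw [h1, Finset.sum_ite_mem, Finset.Ico_inter_Ico, Finset.sum_const]
  have : max (0:ℤ) 0 = 0 := by omega
  rw [this, min_def]
  split_ifs with h
  · rw [Int.card_Ico, nsmul_eq_mul]
    have h2 : ((n - 0).toNat : ℤ) = max 0 (n - k + 1) := by omega
    rw [h2]
  · rw [Int.card_Ico, nsmul_eq_mul]
    have h2 : ((n - k + 1 - 0).toNat : ℤ) = max 0 (n - k + 1) := by omega
    rw [h2]

lemma pv_sum_listmap_swap {β : Type} (s : Finset ℤ) (l : List β) (g : ℤ → β → ℤ) :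
    ∑ x ∈ s, (l.map (g x)).sum = (l.map (fun p => ∑ x ∈ s, g x p)).sum := by
  induction l with
  | nil => simp
  | cons y t ih => simp [Finset.sum_add_distrib, ih]

lemma pv_A_eq (board : List String) (patterns : List (List String))
    (hpats : ∀ p ∈ patterns, p ≠ [] ∧
      1 ≤ PySem.Str.len ((PySem.List.pyGet? p 0).getD "") ∧
      ∀ prow ∈ p, PySem.Str.len prow = PySem.Str.len ((PySem.List.pyGet? p 0).getD "")) :
    find_patterns_in_word_search board patterns =
      (patterns.map (fun p =>
        ∑ r ∈ Finset.Ico (0:ℤ) (board.length:ℤ),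
          ∑ c ∈ Finset.Ico (0:ℤ) (PySem.Str.len ((PySem.List.pyGet? board 0).getD "")),
            (if pvM board (board.length:ℤ) (PySem.Str.len ((PySem.List.pyGet? board 0).getD "")) p r c
             then (1:ℤ) else 0))).sum := by
  simp only [find_patterns_in_word_search]
  set rows : ℤ := (board.length:ℤ) with hrows
  set cols : ℤ := PySem.Str.len ((PySem.List.pyGet? board 0).getD "") with hcols
  have step1 : ∀ (acc r c : ℤ),
      patterns.foldl (fun count pattern =>
        if pvMatches board rows cols r c pattern then count + 1 else count) acc
      = acc + (patterns.map (fun p => if pvMatches board rows cols r c p then (1:ℤ) else 0)).sum := by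
    intro acc r c
    rw [PySem.List.foldl_if_add_one (fun p => pvMatches board rows cols r c p) patterns acc,
        PySem.List.sum_map_ite_one_zero]
  have step2 : ∀ (acc r : ℤ),
      (PySem.List.pyRange 0 cols).foldl (fun count c =>
        patterns.foldl (fun count pattern =>
          if pvMatches board rows cols r c pattern then count + 1 else count) count) acc
      = acc + ((PySem.List.pyRange 0 cols).map (fun c =>
          (patterns.map (fun p => if pvMatches board rows cols r c p then (1:ℤ) else 0)).sum)).sum := by
    intro acc r
    rw [PySem.List.foldl_congr_mem _ _
        (fun a c => a + (patterns.map (fun p => if pvMatches board rows cols r c p then (1:ℤ) else 0)).sum)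
        _ (fun a c _ => step1 a r c),
      PySem.List.foldl_add]
  rw [PySem.List.foldl_congr_mem _ _
      (fun a r => a + ((PySem.List.pyRange 0 cols).map (fun c =>
        (patterns.map (fun p => if pvMatches board rows cols r c p then (1:ℤ) else 0)).sum)).sum)
      _ (fun a r _ => step2 a r),
    PySem.List.foldl_add, zero_add]
  rw [pv_sum_pyRange]
  have hconv : ∀ r ∈ Finset.Ico (0:ℤ) rows,
      ((PySem.List.pyRange 0 cols).map (fun c =>
        (patterns.map (fun p => if pvMatches board rows cols r c p then (1:ℤ) else 0)).sum)).sum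
      = ∑ c ∈ Finset.Ico (0:ℤ) cols,
          (patterns.map (fun p => if pvM board rows cols p r c then (1:ℤ) else 0)).sum := by
    intro r hr
    rw [Finset.mem_Ico] at hr
    rw [pv_sum_pyRange]
    refine Finset.sum_congr rfl (fun c hc => ?_)
    rw [Finset.mem_Ico] at hc
    refine congrArg List.sum (List.map_congr_left (fun p hp => ?_))
    obtain ⟨hp1, hp2, hp3⟩ := hpats p hp
    rw [pv_pvMatches_eq board rows cols p hp1 hp2 hp3 r c hr.1 hc.1]
  rw [Finset.sum_congr rfl hconv]
  refine Eq.trans (Finset.sum_congr rfl (fun r _ =>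
    pv_sum_listmap_swap (Finset.Ico (0:ℤ) cols) patterns
      (fun c p => if pvM board rows cols p r c then (1:ℤ) else 0))) ?_
  exact pv_sum_listmap_swap (Finset.Ico (0:ℤ) rows) patterns
      (fun r p => ∑ c ∈ Finset.Ico (0:ℤ) cols, if pvM board rows cols p r c then (1:ℤ) else 0)

def pvContrib (board : List String) (rows cols : Int) (p : List String) : Int :=
  match pvCells p with
  | [] => max 0 (rows - (p.length:ℤ) + 1) *
          max 0 (cols - PySem.Str.len ((PySem.List.pyGet? p 0).getD "") + 1)
  | (dr0, dc0, ch0) :: rest =>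
      (((pvIndex board).getD ch0 []).countP (fun q =>
        (!decide (q.1 - dr0 < 0 ∨ q.2 - dc0 < 0 ∨ rows < q.1 - dr0 + (p.length:ℤ) ∨
                  cols < q.2 - dc0 + PySem.Str.len ((PySem.List.pyGet? p 0).getD ""))) &&
        rest.all (fun w => pvCell board (q.1 - dr0 + w.1) (q.2 - dc0 + w.2.1) == w.2.2)) : ℤ)

lemma pv_B_eq (board : List String) (patterns : List (List String))
    (hc : PySem.Str.len ((PySem.List.pyGet? board 0).getD "") ≠ 0) :
    find_patterns_in_word_search_alt board patterns =
      (patterns.map (fun p => pvContrib board (board.length:ℤ)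
        (PySem.Str.len ((PySem.List.pyGet? board 0).getD "")) p)).sum := by
  simp only [find_patterns_in_word_search_alt]
  rw [if_neg hc]
  set rows : ℤ := (board.length:ℤ) with hrows
  set cols : ℤ := PySem.Str.len ((PySem.List.pyGet? board 0).getD "") with hcols
  have body : ∀ (acc : ℤ) (p : List String), (fun total pattern =>
      match pvCells pattern with
      | [] => total + max 0 (rows - (pattern.length:ℤ) + 1) *
              max 0 (cols - PySem.Str.len ((PySem.List.pyGet? pattern 0).getD "") + 1)
      | (dr0, dc0, ch0) :: rest =>
        ((pvIndex board).getD ch0 []).foldl (fun total q =>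
          if q.1 - dr0 < 0 ∨ q.2 - dc0 < 0 ∨ rows < q.1 - dr0 + (pattern.length:ℤ) ∨
             cols < q.2 - dc0 + PySem.Str.len ((PySem.List.pyGet? pattern 0).getD "") then total
          else if rest.all (fun w => pvCell board (q.1 - dr0 + w.1) (q.2 - dc0 + w.2.1) == w.2.2)
          then total + 1 else total) total) acc p
      = acc + pvContrib board rows cols p := by
    intro acc p
    simp only [pvContrib]
    cases hcells : pvCells p with
    | nil => simp
    | cons q0 rest =>
      obtain ⟨dr0, dc0, ch0⟩ := q0
      simp only
      rw [PySem.List.foldl_congr_mem _ _ (fun total q =>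
        if ((!decide (q.1 - dr0 < 0 ∨ q.2 - dc0 < 0 ∨ rows < q.1 - dr0 + (p.length:ℤ) ∨
              cols < q.2 - dc0 + PySem.Str.len ((PySem.List.pyGet? p 0).getD ""))) &&
            rest.all (fun w => pvCell board (q.1 - dr0 + w.1) (q.2 - dc0 + w.2.1) == w.2.2)) = true
        then total + 1 else total) _ ?_]
      · rw [PySem.List.foldl_if_add_one]
      · intro a q _
        beta_reduce
        by_cases hC : q.1 - dr0 < 0 ∨ q.2 - dc0 < 0 ∨ rows < q.1 - dr0 + (p.length:ℤ) ∨
            cols < q.2 - dc0 + PySem.Str.len ((PySem.List.pyGet? p 0).getD "")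
        · rw [if_pos hC, if_neg (fun h => by
            rw [Bool.and_eq_true, Bool.not_eq_true', decide_eq_false_iff_not] at h
            exact h.1 hC)]
        · rw [if_neg hC]
          by_cases hD : rest.all (fun w => pvCell board (q.1 - dr0 + w.1) (q.2 - dc0 + w.2.1) == w.2.2) = true
          · rw [if_pos hD, if_pos (by
              rw [Bool.and_eq_true, Bool.not_eq_true', decide_eq_false_iff_not]
              exact ⟨hC, hD⟩)]
          · rw [if_neg hD, if_neg (fun h => by
              rw [Bool.and_eq_true] at h
              exact hD h.2)]
  rw [PySem.List.foldl_congr_mem _ _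
      (fun acc p => acc + pvContrib board rows cols p) _ (fun a p _ => body a p),
    PySem.List.foldl_add, zero_add]

lemma pv_pvM_bounds {board : List String} {rows cols : ℤ} {p : List String} {r c : ℤ}
    (h : pvM board rows cols p r c = true) :
    0 ≤ r ∧ 0 ≤ c ∧ r + (p.length:ℤ) ≤ rows ∧
      c + PySem.Str.len ((PySem.List.pyGet? p 0).getD "") ≤ cols := by
  rw [pvM, Bool.and_eq_true, decide_eq_true_eq] at h
  exact h.1

lemma pv_contrib_nil (board : List String) (rows cols : ℤ) (p : List String)
    (hp1 : p ≠ []) (hp2 : 1 ≤ PySem.Str.len ((PySem.List.pyGet? p 0).getD ""))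
    (hcells : pvCells p = []) :
    pvContrib board rows cols p =
      ∑ r ∈ Finset.Ico (0:ℤ) rows, ∑ c ∈ Finset.Ico (0:ℤ) cols,
        (if pvM board rows cols p r c then (1:ℤ) else 0) := by
  have hpr : 1 ≤ (p.length:ℤ) := by
    have := List.length_pos_iff.2 hp1; omega
  have inner : ∀ r ∈ Finset.Ico (0:ℤ) rows,
      (∑ c ∈ Finset.Ico (0:ℤ) cols, (if pvM board rows cols p r c then (1:ℤ) else 0))
      = (if r + (p.length:ℤ) ≤ rows
         then max 0 (cols - PySem.Str.len ((PySem.List.pyGet? p 0).getD "") + 1) else 0) := by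
    intro r hr
    rw [Finset.mem_Ico] at hr
    by_cases hA : r + (p.length:ℤ) ≤ rows
    · rw [if_pos hA]
      have hsummand : ∀ c ∈ Finset.Ico (0:ℤ) cols,
          (if pvM board rows cols p r c then (1:ℤ) else 0)
          = (if c + PySem.Str.len ((PySem.List.pyGet? p 0).getD "") ≤ cols then (1:ℤ) else 0) := by
        intro c hc
        rw [Finset.mem_Ico] at hc
        by_cases hB : c + PySem.Str.len ((PySem.List.pyGet? p 0).getD "") ≤ cols
        · rw [if_pos hB, if_pos (by
            rw [pvM, hcells, Bool.and_eq_true, decide_eq_true_eq]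
            exact ⟨⟨hr.1, hc.1, hA, hB⟩, by simp⟩)]
        · rw [if_neg hB, if_neg (fun h => hB (pv_pvM_bounds h).2.2.2)]
      rw [Finset.sum_congr rfl hsummand,
        pv_count_interval cols (PySem.Str.len ((PySem.List.pyGet? p 0).getD "")) 1 hp2, mul_one]
    · rw [if_neg hA]
      refine Finset.sum_eq_zero (fun c hc => ?_)
      rw [if_neg (fun h => hA (pv_pvM_bounds h).2.2.1)]
  rw [Finset.sum_congr rfl inner,
    pv_count_interval rows (p.length:ℤ)
      (max 0 (cols - PySem.Str.len ((PySem.List.pyGet? p 0).getD "") + 1)) hpr]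
  simp only [pvContrib, hcells]

lemma pv_contrib_cons (board : List String) (rows cols : ℤ) (p : List String)
    (hrows : rows = (board.length:ℤ))
    (hcols : cols = PySem.Str.len ((PySem.List.pyGet? board 0).getD ""))
    (hcolsle : ∀ row ∈ board, cols ≤ PySem.Str.len row)
    (hp3 : ∀ prow ∈ p, PySem.Str.len prow = PySem.Str.len ((PySem.List.pyGet? p 0).getD ""))
    (dr0 dc0 : ℤ) (ch0 : Char) (rest : List (ℤ × ℤ × Char))
    (hcells : pvCells p = (dr0, dc0, ch0) :: rest) :
    pvContrib board rows cols p =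
      ∑ r ∈ Finset.Ico (0:ℤ) rows, ∑ c ∈ Finset.Ico (0:ℤ) cols,
        (if pvM board rows cols p r c then (1:ℤ) else 0) := by
  set pr : ℤ := (p.length:ℤ) with hpr
  set pc : ℤ := PySem.Str.len ((PySem.List.pyGet? p 0).getD "") with hpc
  -- the anchor cell is a genuine pattern cell
  have hq0 : (dr0, dc0, ch0) ∈ pvCells p := by rw [hcells]; exact List.mem_cons_self
  have hq0' : 0 ≤ dr0 ∧ dr0 < pr ∧ 0 ≤ dc0 ∧ dc0 < pc := by
    rw [pv_pvCells_eq p hp3] at hq0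
    simp only [List.mem_flatMap, List.mem_map, List.mem_filter,
      PySem.List.mem_pyRange_one] at hq0
    obtain ⟨rp, hrp, cp, ⟨hcp, -⟩, heq⟩ := hq0
    simp only [Prod.mk.injEq] at heq
    obtain ⟨rfl, rfl, -⟩ := heq
    exact ⟨hrp.1, hrp.2, hcp.1, hcp.2⟩
  rcases hq0' with ⟨hdr0, hdr1, hdc0, hdc1⟩
  have hGeq : ∀ i j : ℤ,
      (((!decide (i - dr0 < 0 ∨ j - dc0 < 0 ∨ rows < i - dr0 + pr ∨ cols < j - dc0 + pc)) &&
        rest.all (fun w => pvCell board (i - dr0 + w.1) (j - dc0 + w.2.1) == w.2.2)) &&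
        (pvCell board i j == ch0))
      = pvM board rows cols p (i - dr0) (j - dc0) := by
    intro i j
    rw [Bool.eq_iff_iff]
    simp only [pvM, hcells, List.all_cons, Bool.and_eq_true, Bool.not_eq_true',
      decide_eq_false_iff_not, decide_eq_true_eq, beq_iff_eq, ← hpr, ← hpc]
    have h1 : i - dr0 + dr0 = i := by ring
    have h2 : j - dc0 + dc0 = j := by ring
    rw [h1, h2]
    constructor
    · rintro ⟨⟨hb, hrest⟩, hcell⟩
      exact ⟨⟨by omega, by omega, by omega, by omega⟩, hcell, hrest⟩
    · rintro ⟨hb, hcell, hrest⟩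
      exact ⟨⟨by omega, hrest⟩, hcell⟩
  simp only [pvContrib, hcells, ← hpr, ← hpc]
  rw [pv_pvIndex_getD, List.countP_map, List.countP_filter, pv_pvPairs_eq, pv_countP_flatMap,
      Nat.cast_list_sum, List.map_map, ← hrows, pv_sum_pyRange]
  simp only [Function.comp_def]
  have hrowstep : ∀ i ∈ Finset.Ico (0:ℤ) rows,
      (Nat.cast (List.countP (fun a : Char × ℤ × ℤ =>
          ((!decide (a.2.1 - dr0 < 0 ∨ a.2.2 - dc0 < 0 ∨ rows < a.2.1 - dr0 + pr ∨
              cols < a.2.2 - dc0 + pc)) &&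
            rest.all (fun w => pvCell board (a.2.1 - dr0 + w.1) (a.2.2 - dc0 + w.2.1) == w.2.2)) &&
          (a.1 == ch0))
        (List.map (fun j => (pvCell board i j, i, j))
          (PySem.List.pyRange 0 ((PySem.List.pyGetD board i "").toList.length : ℤ)))) : ℤ)
      = ∑ c ∈ Finset.Ico (0:ℤ) cols,
          (if pvM board rows cols p (i - dr0) (c - dc0) then (1:ℤ) else 0) := by
    intro i hi
    rw [Finset.mem_Ico] at hi
    rw [List.countP_map]
    simp only [Function.comp_def]
    rw [pv_countP_pyRange]
    have hlen : cols ≤ ((PySem.List.pyGetD board i "").toList.length : ℤ) := by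
      have hmem := PySem.List.pyGetD_mem board (i := i) ""
        ⟨by omega, by rw [← hrows]; omega⟩
      have := hcolsle _ hmem
      rwa [PySem.Str.len_eq] at this
    have hsub : Finset.Ico (0:ℤ) cols ⊆ Finset.Ico (0:ℤ) ((PySem.List.pyGetD board i "").toList.length : ℤ) :=
      Finset.Ico_subset_Ico le_rfl hlen
    rw [← Finset.sum_subset hsub (fun j hj hnj => ?_)]
    · refine Finset.sum_congr rfl (fun j hj => ?_)
      rw [hGeq i j]
    · rw [Finset.mem_Ico] at hj
      rw [Finset.mem_Ico] at hnj
      have hfalse : pvM board rows cols p (i - dr0) (j - dc0) = false := by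
        by_contra hcon
        rw [Bool.not_eq_false] at hcon
        have := pv_pvM_bounds hcon
        omega
      rw [hGeq i j, hfalse]
      rfl
  rw [Finset.sum_congr rfl hrowstep]
  have hinner : ∀ i ∈ Finset.Ico (0:ℤ) rows,
      (∑ c ∈ Finset.Ico (0:ℤ) cols,
        (if pvM board rows cols p (i - dr0) (c - dc0) then (1:ℤ) else 0))
      = ∑ c ∈ Finset.Ico (0:ℤ) cols,
          (if pvM board rows cols p (i - dr0) c then (1:ℤ) else 0) := by
    intro i _
    refine pv_shift1 (fun x => if pvM board rows cols p (i - dr0) x then (1:ℤ) else 0)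
      cols dc0 pc hdc0 hdc1 (fun x hx => ?_)
    by_cases h : pvM board rows cols p (i - dr0) x = true
    · have := pv_pvM_bounds h
      exact ⟨this.2.1, this.2.2.2⟩
    · rw [Bool.not_eq_true] at h
      simp [h] at hx
  rw [Finset.sum_congr rfl hinner]
  refine pv_shift1 (fun x => ∑ c ∈ Finset.Ico (0:ℤ) cols,
      (if pvM board rows cols p x c then (1:ℤ) else 0)) rows dr0 pr hdr0 hdr1 (fun x hx => ?_)
  obtain ⟨c, -, hc⟩ := Finset.exists_ne_zero_of_sum_ne_zero hx
  by_cases h : pvM board rows cols p x c = true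
  · have := pv_pvM_bounds h
    exact ⟨this.1, this.2.2.1⟩
  · rw [Bool.not_eq_true] at h
    simp [h] at hc

lemma pv_pyGet0_headD {α : Type} (l : List α) (d : α) :
    (PySem.List.pyGet? l 0).getD d = l.headD d := by
  rw [PySem.List.pyGet?_zero]
  cases l <;> rfl


lemma pv_A_zero (board : List String) (patterns : List (List String))
    (h0 : PySem.Str.len ((PySem.List.pyGet? board 0).getD "") = 0) :
    find_patterns_in_word_search board patterns = 0 := by
  simp only [find_patterns_in_word_search, h0]
  rw [PySem.List.pyRange_one_eq_nil le_rfl]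
  simp only [List.foldl_nil]
  rw [PySem.List.foldl_ignore]

lemma pv_B_zero (board : List String) (patterns : List (List String))
    (h0 : PySem.Str.len ((PySem.List.pyGet? board 0).getD "") = 0) :
    find_patterns_in_word_search_alt board patterns = 0 := by
  simp only [find_patterns_in_word_search_alt]
  rw [if_pos h0]

-- ===== VERDICT (by name: the statement is the Claim_ definition above) =====
theorem find_patterns_in_word_search_spec : Claim_equal_find_patterns_in_word_search := by
  intro board patterns hdom hpre
  obtain ⟨hb, hdisj⟩ := hpre
  unfold Spec_find_patterns_in_word_search
  by_cases h0 : PySem.Str.len ((PySem.List.pyGet? board 0).getD "") = 0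
  · rw [pv_A_zero board patterns h0, pv_B_zero board patterns h0]
  · rcases hdisj with rfl | h0' | ⟨hragged, hpats⟩
    · rw [pv_A_eq board [] (by intro p hp; cases hp), pv_B_eq board [] h0]
      rfl
    · rw [← pv_pyGet0_headD (d := "")] at h0'
      exact absurd h0' h0
    · have hpats' : ∀ p ∈ patterns, p ≠ [] ∧
          1 ≤ PySem.Str.len ((PySem.List.pyGet? p 0).getD "") ∧
          ∀ prow ∈ p, PySem.Str.len prow = PySem.Str.len ((PySem.List.pyGet? p 0).getD "") := by
        intro p hp
        obtain ⟨h1, h2, h3⟩ := hpats p hp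
        rw [pv_pyGet0_headD]
        exact ⟨h1, h2, h3⟩
      rw [pv_A_eq board patterns hpats', pv_B_eq board patterns h0]
      refine congrArg List.sum (List.map_congr_left (fun p hp => ?_))
      obtain ⟨hp1, hp2, hp3⟩ := hpats' p hp
      have hcolsle : ∀ row ∈ board,
          PySem.Str.len ((PySem.List.pyGet? board 0).getD "") ≤ PySem.Str.len row := by
        intro row hrow
        rw [pv_pyGet0_headD]
        exact hragged row hrow
      rcases hcellscase : pvCells p with _ | ⟨⟨dr0, dc0, ch0⟩, rest⟩
      · exact (pv_contrib_nil board _ _ p hp1 hp2 hcellscase).symm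
      · exact (pv_contrib_cons board _ _ p rfl rfl hcolsle hp3 dr0 dc0 ch0 rest hcellscase).symm
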